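-- pv_equiv track=rewrite | github.com/Nghia03092004/nghia03092004.github.io | project_euler_unified/problem_833/solution.py | square_triangular_numbers
-- ===== SOURCE A (Python) =====
-- def pell_solutions(K):
--     """Generate first K solutions to x^2 - 2y^2 = 1."""
--     solutions = []
--     x, y = 3, 2
--     for _ in range(K):
--         solutions.append((x, y))
--         x, y = 3*x + 4*y, 2*x + 3*y
--     return solutions
--
-- def square_triangular_numbers(K):
--     """Generate first K square triangular numbers."""
--     result = []
--     for x, y in pell_solutions(K):
--         n = (x - 1) // 2
--         m = y // 2
--         st = m * m
--         result.append((n, m, st))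
--     return result
-- ===== SOURCE B (Python) =====
-- def square_triangular_numbers(K):
--     """Generate first K square triangular numbers via the direct
--     second-order recurrences n_k = 6n_{k-1} - n_{k-2} + 2, m_k = 6m_{k-1} - m_{k-2}."""
--     result = []
--     pn, pm, n, m = 0, 0, 1, 1
--     for _ in range(K):
--         result.append((n, m, m * m))
--         pn, n = n, 6 * n - pn + 2
--         pm, m = m, 6 * m - pm
--     return result
-- ===== Notes on version B (the rewrite author's own statement) =====
-- stated objective: alternative
-- what changed: B drops the Pell (x,y) recurrence and division step and iterates (n,m) directly by the second-order recurrences n_k = 6n_{k-1} - n_{k-2} + 2 and m_k = 6m_{k-1} - m_{k-2}, squaring m for st.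
import Mathlib
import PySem

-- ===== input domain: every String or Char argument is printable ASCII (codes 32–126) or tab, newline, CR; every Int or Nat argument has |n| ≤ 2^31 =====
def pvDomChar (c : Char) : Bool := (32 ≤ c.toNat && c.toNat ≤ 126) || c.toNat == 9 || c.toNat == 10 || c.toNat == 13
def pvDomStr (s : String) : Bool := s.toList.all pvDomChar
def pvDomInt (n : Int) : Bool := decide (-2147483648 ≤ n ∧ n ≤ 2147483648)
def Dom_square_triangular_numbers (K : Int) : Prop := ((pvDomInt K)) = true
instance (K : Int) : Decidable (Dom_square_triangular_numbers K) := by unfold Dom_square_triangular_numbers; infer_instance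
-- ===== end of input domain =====

-- B replaces the Pell (x,y) recurrence + division by the direct second-order
-- recurrences on (n,m): n_k = 6n_{k-1} - n_{k-2} + 2, m_k = 6m_{k-1} - m_{k-2}; same cost.

-- ===== PORT A =====
-- the 'for _ in range(K)' loop of pell_solutions, as structural recursion on the count
def pellLoopA : Nat → Int → Int → List (Int × Int)
  | 0, _, _ => []
  | Nat.succ k, x, y => (x, y) :: pellLoopA k (3*x + 4*y) (2*x + 3*y)

def pell_solutions (K : Int) : List (Int × Int) := pellLoopA K.toNat 3 2

def square_triangular_numbers (K : Int) : List (Int × Int × Int) :=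
  (pell_solutions K).map (fun xy =>
    let n := PySem.Int.floordiv (xy.1 - 1) 2
    let m := PySem.Int.floordiv xy.2 2
    (n, m, m * m))

-- ===== PORT B =====
-- Source B's loop: state (pn, pm, n, m), appending (n, m, m*m) each step
def stLoopB : Nat → Int → Int → Int → Int → List (Int × Int × Int)
  | 0, _, _, _, _ => []
  | Nat.succ k, pn, pm, n, m => (n, m, m * m) :: stLoopB k n m (6*n - pn + 2) (6*m - pm)

def square_triangular_numbers_alt (K : Int) : List (Int × Int × Int) :=
  stLoopB K.toNat 0 0 1 1

-- ===== PRECONDITION & SPEC =====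
def Spec_square_triangular_numbers (K : Int) (out : List (Int × Int × Int)) : Prop := out = square_triangular_numbers_alt K
instance (K : Int) (out : List (Int × Int × Int)) : Decidable (Spec_square_triangular_numbers K out) := by unfold Spec_square_triangular_numbers; infer_instance

-- ===== CLAIM (what is proved, stated in full; the proofs are below) =====
def Claim_equal_square_triangular_numbers : Prop := ∀ (K : Int), Dom_square_triangular_numbers K → Spec_square_triangular_numbers K (square_triangular_numbers K)

-- ===== LEMMAS AND PROOFS =====
theorem fdiv_two_mul (a : Int) : PySem.Int.floordiv (2*a) 2 = a := by
  rw [PySem.Int.floordiv_eq_ediv_of_pos (by norm_num)]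
  omega

-- invariant: pell state (2n+1, 2m) with B state (3n-4m+1, 3m-2n-1, n, m) produce equal lists
theorem loop_agree (k : Nat) : ∀ (n m : Int),
    (pellLoopA k (2*n + 1) (2*m)).map (fun xy =>
      let n' := PySem.Int.floordiv (xy.1 - 1) 2
      let m' := PySem.Int.floordiv xy.2 2
      (n', m', m' * m')) = stLoopB k (3*n - 4*m + 1) (3*m - 2*n - 1) n m := by
  induction k with
  | zero => intro n m; rfl
  | succ k ih =>
    intro n m
    have h1 : 3*(2*n+1) + 4*(2*m) = 2*(3*n + 4*m + 1) + 1 := by ring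
    have h2 : 2*(2*n+1) + 3*(2*m) = 2*(2*n + 3*m + 1) := by ring
    simp only [pellLoopA, stLoopB, List.map, h1, h2, ih]
    have hd : 2*n + 1 - 1 = 2*n := by ring
    have e1 : 3*(3*n + 4*m + 1) - 4*(2*n + 3*m + 1) + 1 = n := by ring
    have e2 : 3*(2*n + 3*m + 1) - 2*(3*n + 4*m + 1) - 1 = m := by ring
    have e3 : 6*n - (3*n - 4*m + 1) + 2 = 3*n + 4*m + 1 := by ring
    have e4 : 6*m - (3*m - 2*n - 1) = 2*n + 3*m + 1 := by ring
    rw [hd, fdiv_two_mul, fdiv_two_mul, e1, e2, e3, e4]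

-- ===== VERDICT (by name: the statement is the Claim_ definition above) =====
theorem square_triangular_numbers_spec : Claim_equal_square_triangular_numbers := by
  intro K _
  unfold Spec_square_triangular_numbers square_triangular_numbers square_triangular_numbers_alt pell_solutions
  have h := loop_agree K.toNat 1 1
  simp only [show (2:Int) * 1 + 1 = 3 by norm_num, show (2:Int) * 1 = 2 by norm_num,
    show (3:Int) * 1 - 4 * 1 + 1 = 0 by norm_num, show (3:Int) * 1 - 2 * 1 - 1 = 0 by norm_num] at h
  exact h
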